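-- pv_equiv track=rewrite | github.com/sgomezsaez/SCARF-Evaluation | wikipedia_workload/de/uni-stuttgart/iaas/workload/csvHelper/csvHelper.py | getColumnsWithLabel
-- ===== SOURCE A (Python) =====
-- def getColumn(reader, column):
--         return [result[column] for result in reader]
--
-- def getColumnsWithLabel(reader, label):
--     result = []
--     columnLabel = reader[0]
--     index = 0
--     for i in columnLabel:
--         if i == label:
--             result.append(getColumn(reader, index))
--         index += 1
--     return result
-- ===== SOURCE B (Python) =====
-- def getColumnsWithLabel(reader, label):
--     indices = [i for i, h in enumerate(reader[0]) if h == label]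
--     result = [[] for _ in indices]
--     for row in reader:
--         for j, idx in enumerate(indices):
--             result[j].append(row[idx])
--     return result
-- ===== Notes on version B (the rewrite author's own statement) =====
-- stated objective: alternative
-- what changed: B first computes the matching column indices from the header, then fills all result columns in a single pass over the rows (rows outer, indices inner), instead of A's one full scan of the reader per matching header cell.
import Mathlib
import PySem

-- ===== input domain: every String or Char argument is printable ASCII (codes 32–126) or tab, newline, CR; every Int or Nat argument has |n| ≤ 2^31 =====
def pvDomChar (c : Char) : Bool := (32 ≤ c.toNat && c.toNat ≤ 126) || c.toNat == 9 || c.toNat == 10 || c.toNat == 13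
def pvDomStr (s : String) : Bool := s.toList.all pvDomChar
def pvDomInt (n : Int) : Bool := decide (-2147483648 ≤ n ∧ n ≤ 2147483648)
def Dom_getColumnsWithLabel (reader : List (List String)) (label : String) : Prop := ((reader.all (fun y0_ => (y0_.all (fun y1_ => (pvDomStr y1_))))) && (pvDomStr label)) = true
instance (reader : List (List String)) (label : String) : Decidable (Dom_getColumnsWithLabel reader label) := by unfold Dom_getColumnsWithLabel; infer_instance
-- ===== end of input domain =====

-- B differs from A in decomposition only (indices first, then one pass over rows); return values agree.
-- ===== PORT A =====
def getColumn (reader : List (List String)) (column : Int) : List String :=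
  reader.map (fun r => (PySem.List.pyGet? r column).getD "")

def getColumnsWithLabel (reader : List (List String)) (label : String) : List (List String) :=
  let columnLabel := (PySem.List.pyGet? reader 0).getD []
  (columnLabel.foldl
    (fun (s : List (List String) × Int) i =>
      (if i == label then s.1 ++ [getColumn reader s.2] else s.1, s.2 + 1))
    ([], 0)).1

-- ===== PORT B =====
def getColumnsWithLabel_alt (reader : List (List String)) (label : String) : List (List String) :=
  let header := (PySem.List.pyGet? reader 0).getD []
  let indices := ((PySem.List.enumerate header 0).filter (fun p => p.2 == label)).map (fun p => p.1)
  let init : List (List String) := indices.map (fun _ => ([] : List String))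
  reader.foldl
    (fun acc row =>
      (acc.zip indices).map (fun ci => ci.1 ++ [(PySem.List.pyGet? row ci.2).getD ""]))
    init

-- ===== PRECONDITION & SPEC =====
-- Pre_ excludes exactly the inputs on which Python A raises: an empty reader (reader[0] → IndexError)
-- and rows too short at a matching header index (row[index] → IndexError).
def Pre_getColumnsWithLabel (reader : List (List String)) (label : String) : Prop :=
  reader ≠ [] ∧
  ∀ p ∈ PySem.List.enumerate (reader.headD []) 0, p.2 = label →
    ∀ row ∈ reader, PySem.Raise.InRange row.length p.1
instance (reader : List (List String)) (label : String) : Decidable (Pre_getColumnsWithLabel reader label) := by unfold Pre_getColumnsWithLabel; infer_instance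

def pvWitness_getColumnsWithLabel : List (List String) × String :=
  ([["x", "y", "x"], ["1", "2", "3"], ["4", "5", "6"]], "x")

def Spec_getColumnsWithLabel (reader : List (List String)) (label : String) (out : List (List String)) : Prop := out = getColumnsWithLabel_alt reader label
instance (reader : List (List String)) (label : String) (out : List (List String)) : Decidable (Spec_getColumnsWithLabel reader label out) := by unfold Spec_getColumnsWithLabel; infer_instance

-- ===== CLAIM (what is proved, stated in full; the proofs are below) =====
def Claim_equal_getColumnsWithLabel : Prop := ∀ (reader : List (List String)) (label : String), Dom_getColumnsWithLabel reader label → Pre_getColumnsWithLabel reader label → Spec_getColumnsWithLabel reader label (getColumnsWithLabel reader label)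

-- ===== LEMMAS AND PROOFS =====
/-- Matching indices of `label` in `hdr`, counting from `n`. -/
def idxF (label : String) : List String → Int → List Int
  | [], _ => []
  | h :: t, n => if h == label then n :: idxF label t (n + 1) else idxF label t (n + 1)

theorem foldA_eq (reader : List (List String)) (label : String) :
    ∀ (hdr : List String) (acc : List (List String)) (n : Int),
      (hdr.foldl
        (fun (s : List (List String) × Int) i =>
          (if i == label then s.1 ++ [getColumn reader s.2] else s.1, s.2 + 1))
        (acc, n)).1
      = acc ++ (idxF label hdr n).map (getColumn reader) := by
  intro hdr
  induction hdr with
  | nil => intro acc n; simp [idxF]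
  | cons h t ih =>
    intro acc n
    simp only [List.foldl_cons]
    by_cases hh : h = label
    · rw [if_pos (show (h == label) = true by simp [hh]), ih]
      simp [idxF, hh, List.append_assoc]
    · rw [if_neg (show ¬ (h == label) = true by simp [hh]), ih]
      simp [idxF, hh]

theorem indices_eq (label : String) :
    ∀ (hdr : List String) (n : Int),
      ((PySem.List.enumerate hdr n).filter (fun p => p.2 == label)).map (fun p => p.1)
        = idxF label hdr n := by
  intro hdr
  induction hdr with
  | nil => intro n; simp [PySem.List.enumerate_nil, idxF]
  | cons h t ih =>
    intro n
    by_cases hh : h = label <;>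
      simp [PySem.List.enumerate_cons, hh, idxF, ih]

theorem foldB_eq :
    ∀ (rows : List (List String)) (indices : List Int) (g : Int → List String),
      rows.foldl
        (fun acc row =>
          (acc.zip indices).map (fun ci => ci.1 ++ [(PySem.List.pyGet? row ci.2).getD ""]))
        (indices.map g)
      = indices.map (fun i => g i ++ rows.map (fun row => (PySem.List.pyGet? row i).getD "")) := by
  intro rows
  induction rows with
  | nil => intro indices g; simp
  | cons row rows ih =>
    intro indices g
    have hzip : (indices.map g).zip indices = indices.map (fun i => (g i, i)) := by
      induction indices <;> simp_all
    simp only [List.foldl_cons, hzip, List.map_map, Function.comp_def]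
    rw [ih indices (fun i => g i ++ [(PySem.List.pyGet? row i).getD ""])]
    simp [List.append_assoc]

-- ===== VERDICT (by name: the statement is the Claim_ definition above) =====
theorem getColumnsWithLabel_spec : Claim_equal_getColumnsWithLabel := by
  intro reader label _ _
  unfold Spec_getColumnsWithLabel
  simp only [getColumnsWithLabel, getColumnsWithLabel_alt]
  rw [indices_eq label, foldA_eq reader label, foldB_eq]
  simp [getColumn]
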